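-- pv_equiv track=rewrite | github.com/dstapel/Dieter---ETL---MonarchMoney | MonarchMoneyMain-v3.py | _headers_rows
-- ===== SOURCE A (Python) =====
-- def _headers_rows(records: list[dict]):
--     if not records:
--         return [], []
--
--     # Define the desired column order, with timestamps at the end
--     # Exclude redundant empty columns: accountDisplayName, accountId
--     base_columns = [
--         "__typename",
--         # Replace "account" with its breakout (skip redundant accountDisplayName, accountId)
--         "AccID", "AccDispName", "AccType",
--         "amount", "attachments",
--         # Replace "category" with its breakout
--         "CatID", "CatDispName", "CatType",
--         "date", "hideFromReports", "id", "isRecurring", "isSplitTransaction",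
--         # Replace "merchant" with its breakout
--         "MrchntID", "MrchntDispName", "MrchntTranCount", "MrchntType",
--         "needsReview", "notes", "pending", "plaidName", "reviewStatus",
--         # Keep original "tags" AND add "TagsCSL" right after
--         "tags", "TagsCSL",
--         # Timestamps at the end, before our metadata
--         "createdAt", "updatedAt",
--         # Our metadata last
--         "loadedAtUtc"
--     ]
--
--     # Get all unique keys from records
--     all_keys = {k for r in records for k in r.keys()}
--
--     # Remove the redundant empty columns
--     all_keys.discard("accountDisplayName")
--     all_keys.discard("accountId")
--
--     # Start with base columns that exist in the data
--     headers = [col for col in base_columns if col in all_keys]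
--
--     # Add any remaining columns that aren't in our base list (for flexibility)
--     remaining = all_keys - set(headers)
--     headers.extend(sorted(remaining))
--
--     rows = [[r.get(h, "") for h in headers] for r in records]
--     return headers, rows
-- ===== SOURCE B (Python) =====
-- def _headers_rows(records: list[dict]):
--     if not records:
--         return [], []
--     base_columns = [
--         "__typename",
--         "AccID", "AccDispName", "AccType",
--         "amount", "attachments",
--         "CatID", "CatDispName", "CatType",
--         "date", "hideFromReports", "id", "isRecurring", "isSplitTransaction",
--         "MrchntID", "MrchntDispName", "MrchntTranCount", "MrchntType",
--         "needsReview", "notes", "pending", "plaidName", "reviewStatus",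
--         "tags", "TagsCSL",
--         "createdAt", "updatedAt",
--         "loadedAtUtc",
--     ]
--     index = {col: i for i, col in enumerate(base_columns)}
--     all_keys = set()
--     for r in records:
--         all_keys |= r.keys()
--     all_keys -= {"accountDisplayName", "accountId"}
--     headers = sorted(all_keys, key=lambda k: (index.get(k, len(base_columns)), k))
--     rows = [[r.get(h, "") for h in headers] for r in records]
--     return headers, rows
-- ===== Notes on version B (the rewrite author's own statement) =====
-- stated objective: alternative
-- what changed: Replaces the two-phase header construction (scan base_columns filtering by membership, then append sorted leftovers, with a set-difference pass) by a single stable sort of the key set under the composite key (rank from a precomputed base-column index map with sentinel len(base_columns), then the key itself).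
import Mathlib
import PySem

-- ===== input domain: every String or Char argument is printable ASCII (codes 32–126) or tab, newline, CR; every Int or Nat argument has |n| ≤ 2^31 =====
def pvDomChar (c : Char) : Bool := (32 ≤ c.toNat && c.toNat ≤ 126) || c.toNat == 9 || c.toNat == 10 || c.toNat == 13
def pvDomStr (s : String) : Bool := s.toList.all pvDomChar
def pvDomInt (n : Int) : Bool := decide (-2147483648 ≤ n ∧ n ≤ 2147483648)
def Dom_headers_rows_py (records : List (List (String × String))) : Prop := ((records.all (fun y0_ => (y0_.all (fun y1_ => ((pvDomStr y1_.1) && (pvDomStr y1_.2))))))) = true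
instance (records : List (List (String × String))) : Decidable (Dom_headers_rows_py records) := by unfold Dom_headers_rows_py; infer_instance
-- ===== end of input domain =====

-- B replaces A's two-phase header construction (filter base_columns by membership, then append the
-- sorted leftovers of a set difference) by ONE stable sort of the key set under the composite key
-- (rank from a precomputed base-column index map, sentinel len(base_columns), then the key itself);
-- objective: alternative decomposition, same observable behaviour.

-- ===== PORT A =====
def pvBaseColumns : List String :=
  ["__typename",
   "AccID", "AccDispName", "AccType",
   "amount", "attachments",
   "CatID", "CatDispName", "CatType",
   "date", "hideFromReports", "id", "isRecurring", "isSplitTransaction",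
   "MrchntID", "MrchntDispName", "MrchntTranCount", "MrchntType",
   "needsReview", "notes", "pending", "plaidName", "reviewStatus",
   "tags", "TagsCSL",
   "createdAt", "updatedAt",
   "loadedAtUtc"]

def headers_rows_py (records : List (List (String × String))) : List String × List (List String) :=
  if records.isEmpty then ([], []) else
  let allKeys0 : PySem.Set String :=
    PySem.Set.ofList (records.flatMap (fun r => (PySem.Dict.mk r).keys))
  let allKeys : PySem.Set String :=
    PySem.Set.discard (PySem.Set.discard allKeys0 "accountDisplayName") "accountId"
  let headers0 : List String := pvBaseColumns.filter (fun col => PySem.Set.contains allKeys col)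
  let remaining : PySem.Set String := PySem.Set.diff allKeys (PySem.Set.ofList headers0)
  let headers : List String := headers0 ++ PySem.List.sorted remaining (fun k => k) false
  (headers, records.map (fun r => headers.map (fun h => (PySem.Dict.mk r).getD h "")))

-- ===== PORT B =====
def pvIndexMap : PySem.Dict String Int :=
  (PySem.List.enumerate pvBaseColumns).foldl (fun d p => d.insert p.2 p.1) (PySem.Dict.mk [])

def headers_rows_py_alt (records : List (List (String × String))) : List String × List (List String) :=
  if records.isEmpty then ([], []) else
  let allKeys : PySem.Set String :=
    PySem.Set.diff
      (records.foldl (fun s r => PySem.Set.update s ((PySem.Dict.mk r).keys)) PySem.Set.empty)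
      (PySem.Set.ofList ["accountDisplayName", "accountId"])
  let headers : List String :=
    PySem.List.sorted2 allKeys
      (fun k => pvIndexMap.getD k ((pvBaseColumns.length : Nat) : Int)) (fun k => k) false
  (headers, records.map (fun r => headers.map (fun h => (PySem.Dict.mk r).getD h "")))

-- ===== PRECONDITION & SPEC =====
def Spec_headers_rows_py (records : List (List (String × String))) (out : List String × List (List String)) : Prop := out = headers_rows_py_alt records
instance (records : List (List (String × String))) (out : List String × List (List String)) : Decidable (Spec_headers_rows_py records out) := by unfold Spec_headers_rows_py; infer_instance

-- ===== CLAIM (what is proved, stated in full; the proofs are below) =====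
def Claim_equal_headers_rows_py : Prop := ∀ (records : List (List (String × String))), Dom_headers_rows_py records → Spec_headers_rows_py records (headers_rows_py records)

-- ===== LEMMAS AND PROOFS =====

-- rank as B computes it (proof abbreviation only; the ports do not use it)
def pvRank (k : String) : Int := pvIndexMap.getD k ((pvBaseColumns.length : Nat) : Int)

lemma pv_nodup_base : pvBaseColumns.Nodup := by decide

set_option maxRecDepth 4000 in
lemma pv_rank_pairwise : pvBaseColumns.Pairwise (fun a b => pvRank a < pvRank b) := by decide

lemma pv_rank_lt {k : String} (h : k ∈ pvBaseColumns) : pvRank k < 28 := by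
  have hall : pvBaseColumns.all (fun k => decide (pvRank k < 28)) = true := by decide
  simpa using List.all_eq_true.mp hall k h

lemma pv_keys_index : pvIndexMap.keys = pvBaseColumns := by decide

lemma pv_rank_notin {k : String} (h : k ∉ pvBaseColumns) : pvRank k = 28 := by
  have hc : pvIndexMap.contains k = false := by
    by_contra hne
    have hc' : pvIndexMap.contains k = true := by
      cases hx : pvIndexMap.contains k
      · exact absurd hx hne
      · rfl
    rcases List.any_eq_true.mp hc' with ⟨p, hp, hpk⟩
    exact h (pv_keys_index ▸ (List.mem_map.mpr ⟨p, hp, (beq_iff_eq.mp hpk)⟩))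
  have h28 : ((pvBaseColumns.length : Nat) : Int) = 28 := by decide
  simpa [pvRank, h28] using PySem.Dict.getD_of_not_contains pvIndexMap ((pvBaseColumns.length : Nat) : Int) hc

-- sorted2 with keys into linear orders is sorted with the lexicographic key
lemma sorted2_eq_sorted_lex {α κ₁ κ₂ : Type} [LinearOrder κ₁] [LinearOrder κ₂]
    (xs : List α) (k1 : α → κ₁) (k2 : α → κ₂) :
    PySem.List.sorted2 xs k1 k2 false
      = PySem.List.sorted xs (fun x => (toLex (k1 x, k2 x) : Lex (κ₁ × κ₂))) false := by
  have hfun : (fun (a b : α) => decide ((toLex (k1 a, k2 a) : Lex (κ₁ × κ₂)) < toLex (k1 b, k2 b)))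
      = fun a b => decide (k1 a < k1 b) || (!decide (k1 b < k1 a) && decide (k2 a < k2 b)) := by
    funext a b
    rcases lt_trichotomy (k1 a) (k1 b) with h | h | h
    · simp [Prod.Lex.lt_iff, h]
    · simp [Prod.Lex.lt_iff, h]
    · simp [Prod.Lex.lt_iff, h, lt_asymm h, ne_of_gt h]
  unfold PySem.List.sorted2 PySem.List.sorted
  simp only [if_neg (by simp : ¬ (false = true))]
  rw [hfun]

-- the single lex sort produces exactly A's two-phase header list
lemma pv_headers_eq (K : PySem.Set String) (hK : K.Nodup) :
    PySem.List.sorted2 K (fun k => pvIndexMap.getD k ((pvBaseColumns.length : Nat) : Int)) (fun k => k) false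
      = pvBaseColumns.filter (fun col => PySem.Set.contains K col)
        ++ PySem.List.sorted
             (PySem.Set.diff K (PySem.Set.ofList (pvBaseColumns.filter (fun col => PySem.Set.contains K col))))
             (fun k => k) false := by
  classical
  set hd0 : List String := pvBaseColumns.filter (fun col => PySem.Set.contains K col) with hhd0
  set rem : List String := PySem.Set.diff K (PySem.Set.ofList hd0) with hrem
  have hmem_hd0 : ∀ x, x ∈ hd0 ↔ x ∈ pvBaseColumns ∧ x ∈ K := by
    intro x
    simp [hhd0, List.mem_filter, PySem.Set.contains]
  have hmem_rem : ∀ x, x ∈ rem ↔ x ∈ K ∧ x ∉ hd0 := by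
    intro x
    simp [hrem, PySem.Set.diff, List.mem_filter, PySem.Set.contains, PySem.Set.mem_ofList]
  have hrem_notbase : ∀ x ∈ rem, x ∉ pvBaseColumns := by
    intro x hx hxb
    rcases (hmem_rem x).mp hx with ⟨hxK, hxh⟩
    exact hxh ((hmem_hd0 x).mpr ⟨hxb, hxK⟩)
  have hnodup_hd0 : hd0.Nodup := pv_nodup_base.filter _
  have hnodup_rem : rem.Nodup := hK.filter _
  -- permutation
  have hperm : (hd0 ++ PySem.List.sorted rem (fun k => k) false).Perm K := by
    have h1 : (PySem.List.sorted rem (fun k => k) false).Perm rem :=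
      PySem.List.sorted_perm rem (fun k => k) false
    have h2 : hd0.Perm (K.filter (fun x => decide (x ∈ hd0))) := by
      refine (List.perm_ext_iff_of_nodup hnodup_hd0 (hK.filter _)).mpr ?_
      intro a
      simp only [List.mem_filter, decide_eq_true_eq]
      constructor
      · intro ha
        exact ⟨((hmem_hd0 a).mp ha).2, ha⟩
      · intro ha
        exact ha.2
    have h3 : rem = K.filter (fun x => !decide (x ∈ hd0)) := by
      rw [hrem]
      apply List.filter_congr
      intro x hx
      simp [PySem.Set.contains, PySem.Set.mem_ofList]
    have h4 : (hd0 ++ PySem.List.sorted rem (fun k => k) false).Perm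
        (K.filter (fun x => decide (x ∈ hd0)) ++ rem) := List.Perm.append h2 h1
    refine h4.trans ?_
    rw [h3]
    exact List.filter_append_perm _ K
  -- pairwise strict increase under the lex key
  have hpw : (hd0 ++ PySem.List.sorted rem (fun k => k) false).Pairwise
      (fun a b => (toLex (pvRank a, a) : Lex (Int × String)) < toLex (pvRank b, b)) := by
    rw [List.pairwise_append]
    refine ⟨?_, ?_, ?_⟩
    · have := pv_rank_pairwise.filter (fun col => PySem.Set.contains K col)
      exact this.imp (fun h => Prod.Lex.lt_iff.mpr (Or.inl h))
    · have hle : (PySem.List.sorted rem (fun k => k) false).Pairwise (fun a b => a ≤ b) :=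
        PySem.List.sorted_pairwise rem (fun k => k)
      have hnd : (PySem.List.sorted rem (fun k => k) false).Nodup :=
        (PySem.List.sorted_perm rem (fun k => k) false).symm.nodup hnodup_rem
      have := hle.and hnd
      refine this.imp_of_mem ?_
      intro a b ha hb hab
      have haN : a ∉ pvBaseColumns := hrem_notbase a ((PySem.List.mem_sorted rem _ false a).mp ha)
      have hbN : b ∉ pvBaseColumns := hrem_notbase b ((PySem.List.mem_sorted rem _ false b).mp hb)
      refine Prod.Lex.lt_iff.mpr (Or.inr ⟨?_, lt_of_le_of_ne hab.1 hab.2⟩)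
      simp [pv_rank_notin haN, pv_rank_notin hbN]
    · intro a ha b hb
      have haB : a ∈ pvBaseColumns := ((hmem_hd0 a).mp ha).1
      have hbN : b ∉ pvBaseColumns := hrem_notbase b ((PySem.List.mem_sorted rem _ false b).mp hb)
      refine Prod.Lex.lt_iff.mpr (Or.inl ?_)
      rw [pv_rank_notin hbN]
      exact pv_rank_lt haB
  calc PySem.List.sorted2 K (fun k => pvIndexMap.getD k ((pvBaseColumns.length : Nat) : Int)) (fun k => k) false
      = PySem.List.sorted K (fun k => (toLex (pvRank k, k) : Lex (Int × String))) false := by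
        rw [sorted2_eq_sorted_lex]; rfl
    _ = hd0 ++ PySem.List.sorted rem (fun k => k) false :=
        PySem.List.sorted_eq_of_perm_of_pairwise_lt K _ _ hperm hpw

-- B's key collection is A's
lemma pv_foldl_update (records : List (List (String × String))) (s : PySem.Set String) :
    records.foldl (fun s r => PySem.Set.update s ((PySem.Dict.mk r).keys)) s
      = PySem.Set.update s (records.flatMap (fun r => (PySem.Dict.mk r).keys)) := by
  induction records generalizing s with
  | nil => simp [PySem.Set.update]
  | cons r rs ih =>
      rw [List.foldl_cons, ih, List.flatMap_cons]
      simp only [PySem.Set.update, List.foldl_append]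

lemma pv_diff_pair (s : PySem.Set String) :
    PySem.Set.diff s (PySem.Set.ofList ["accountDisplayName", "accountId"])
      = PySem.Set.discard (PySem.Set.discard s "accountDisplayName") "accountId" := by
  have h2 : PySem.Set.ofList ["accountDisplayName", "accountId"]
      = ["accountDisplayName", "accountId"] := by decide
  simp only [PySem.Set.diff, PySem.Set.discard, h2, List.filter_filter]
  apply List.filter_congr
  intro x _
  by_cases h1 : x = "accountDisplayName" <;> by_cases hb : x = "accountId" <;>
    simp [h1, hb]

-- ===== VERDICT (by name: the statement is the Claim_ definition above) =====
theorem headers_rows_py_spec : Claim_equal_headers_rows_py := by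
  intro records _
  unfold Spec_headers_rows_py headers_rows_py headers_rows_py_alt
  by_cases h : records.isEmpty
  · simp [h]
  · simp only [h]
    rw [pv_foldl_update]
    have hof : PySem.Set.update PySem.Set.empty (records.flatMap (fun r => (PySem.Dict.mk r).keys))
        = PySem.Set.ofList (records.flatMap (fun r => (PySem.Dict.mk r).keys)) := rfl
    rw [hof, pv_diff_pair]
    set K : PySem.Set String :=
      PySem.Set.discard
        (PySem.Set.discard (PySem.Set.ofList (records.flatMap (fun r => (PySem.Dict.mk r).keys)))
          "accountDisplayName") "accountId" with hKdef
    have hK : K.Nodup := by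
      apply List.Nodup.filter
      apply List.Nodup.filter
      exact PySem.Set.nodup_ofList _
    rw [pv_headers_eq K hK]
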